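-- pv_equiv track=rewrite | github.com/ljmfong/Poecilia-bifurca-Characterizing-Sex-Chromosome | python_scripts/python3_exclude-snp-clusters_test_dave.py | get_snp_cluster
-- ===== SOURCE A (Python) =====
-- from collections import defaultdict
--
-- def find_snp_cluster(snp_positions, read_length, mismatches):
--     '''Excludes clusters of neighbouring SNPs as described in Stevenson et al.,
--        BMC Genomics 2013. If more SNPs occur in a window that equals the length
--        of one read than the allowed number of mismatches in the alignment the
--        SNPs are excluded. This should reduce the systematic bias in measures of
--        ASE using RNA-Seq date with one reference genome.
--     '''
--     exclude = []
--
--     for i in range(len(snp_positions)):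
--
--         cluster = [snp_positions[i]]
--
--         for x in range(i+1, len(snp_positions)):
--
--             if snp_positions[x] > snp_positions[i] + read_length:
--
--                 if len(cluster) > mismatches:
--                     exclude += cluster
--                     # print cluster
--                 break
--
--             else:
--                 cluster.append(snp_positions[x])
--
--     return set(exclude)
--
-- def get_snp_cluster(snp_positions, read_length, mismatches):
--     '''Takes a dictionary with keys=chromosomes and list of snp positions as
--        input and uses find_snp_cluster() to determine which SNPs occur in
--        clusters.
--     '''
--     snp_cluster = defaultdict(list)
--
--     for chromosome in snp_positions:
--         snps = snp_positions[chromosome]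
--         snp_cluster[chromosome] = find_snp_cluster(snps,
--                                                    read_length,
--                                                    mismatches)
--
--     return snp_cluster
-- ===== SOURCE B (Python) =====
-- def _find_clusters(snps, read_length, mismatches):
--     """Right-to-left pass keeping a monotonic stack of (index, position) of the
--     strict prefix-maxima of the already-seen suffix; the first stack entry whose
--     position exceeds snps[i] + read_length is the first window-breaking SNP, so
--     the inner scan never revisits dominated elements."""
--     stack = []          # (index, position), nearest index last, positions increasing towards the bottom
--     exclude = []
--     for i, p in reversed(list(enumerate(snps))):
--         limit = p + read_length
--         for idx, q in reversed(stack):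
--             if q > limit:
--                 if idx - i > mismatches:
--                     exclude = snps[i:idx] + exclude
--                 break
--         while stack and stack[-1][1] <= p:
--             stack.pop()
--         stack.append((i, p))
--     return set(exclude)
--
--
-- def get_snp_cluster(snp_positions, read_length, mismatches):
--     return {c: _find_clusters(snp_positions[c], read_length, mismatches)
--             for c in snp_positions}
-- ===== Notes on version B (the rewrite author's own statement) =====
-- stated objective: alternative
-- what changed: Per chromosome, B replaces A's forward rescan of the suffix for every SNP by a single right-to-left pass that keeps a monotonic stack of suffix prefix-maxima (index, position): the first stack entry whose position exceeds snps[i]+read_length is exactly the first window-breaking SNP, so dominated elements are never revisited.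
import Mathlib
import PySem

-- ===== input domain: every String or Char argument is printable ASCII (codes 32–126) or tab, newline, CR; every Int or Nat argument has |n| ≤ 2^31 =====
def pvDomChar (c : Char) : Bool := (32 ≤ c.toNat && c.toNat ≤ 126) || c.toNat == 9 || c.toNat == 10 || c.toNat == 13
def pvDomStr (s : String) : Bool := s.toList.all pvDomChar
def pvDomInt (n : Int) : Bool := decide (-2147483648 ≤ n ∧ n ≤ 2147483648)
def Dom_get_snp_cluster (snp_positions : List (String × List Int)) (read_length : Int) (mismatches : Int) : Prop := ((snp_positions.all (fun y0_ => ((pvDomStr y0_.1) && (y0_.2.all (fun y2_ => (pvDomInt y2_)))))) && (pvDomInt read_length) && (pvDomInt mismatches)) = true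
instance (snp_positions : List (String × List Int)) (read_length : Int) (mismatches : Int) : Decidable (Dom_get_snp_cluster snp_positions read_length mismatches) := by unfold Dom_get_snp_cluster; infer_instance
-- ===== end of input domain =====

-- B replaces A's per-SNP forward rescan by one right-to-left pass over each chromosome that
-- maintains a monotonic stack of suffix prefix-maxima, so each window-breaking SNP is found
-- by scanning only stack entries (objective: alternative algorithm of similar cost; its
-- measured speed was not compared).

-- ===== PORT A =====
-- inner 'for x in range(i+1, len(snp_positions))' with its break, over the suffix after i;
-- `cluster` is the accumulator list, `base` is snp_positions[i]
def pvClusterLoopA (read_length mismatches base : Int) : List Int → List Int → List Int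
  | _cluster, [] => []
  | cluster, p :: rest =>
      if p > base + read_length then
        (if (cluster.length : Int) > mismatches then cluster else [])
      else pvClusterLoopA read_length mismatches base (cluster ++ [p]) rest

-- outer 'for i in range(len(snp_positions))': each i sees the suffix after it; 'exclude += cluster'
def pvFindLoopA (read_length mismatches : Int) : List Int → List Int
  | [] => []
  | p :: rest =>
      pvClusterLoopA read_length mismatches p [p] rest ++ pvFindLoopA read_length mismatches rest

def find_snp_cluster (snp_positions : List Int) (read_length mismatches : Int) : List Int :=
  PySem.Set.ofList (pvFindLoopA read_length mismatches snp_positions)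

-- 'for chromosome in snp_positions: snp_cluster[chromosome] = find_snp_cluster(...)' on a defaultdict
def get_snp_cluster (snp_positions : List (String × List Int)) (read_length : Int) (mismatches : Int) : List (String × List Int) :=
  ((PySem.Set.ofList (snp_positions.map Prod.fst)).foldl
    (fun acc c =>
      PySem.Dict.insert acc c
        (find_snp_cluster ((PySem.Dict.mk snp_positions).getD c []) read_length mismatches))
    PySem.Dict.empty).items

-- ===== PORT B =====
-- 'for idx, q in reversed(stack): if q > limit: … break' — first stack entry past the limit
def pvQueryB (limit : Int) : List (Int × Int) → Option Int
  | [] => none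
  | (idx, q) :: st => if q > limit then some idx else pvQueryB limit st

-- the right-to-left pass of B: consumes reversed(list(enumerate(snps))), carries the stack
-- (nearest index first = Python's stack read from the top) and the exclude accumulator
def pvPassB (snps : List Int) (read_length mismatches : Int) :
    List (Int × Int) → List (Int × Int) → List Int → List Int
  | [], _st, exclude => exclude
  | (i, p) :: rest, st, exclude =>
      let exclude' :=
        match pvQueryB (p + read_length) st with
        | some idx => if idx - i > mismatches then PySem.List.slice snps (some i) (some idx) ++ exclude else exclude
        | none => exclude
      pvPassB snps read_length mismatches rest
        ((i, p) :: st.dropWhile (fun e => e.2 ≤ p)) exclude'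

def pvFindClustersB (snps : List Int) (read_length mismatches : Int) : List Int :=
  PySem.Set.ofList (pvPassB snps read_length mismatches ((PySem.List.enumerate snps).reverse) [] [])

-- '{c: _find_clusters(snp_positions[c], …) for c in snp_positions}'
def get_snp_cluster_alt (snp_positions : List (String × List Int)) (read_length : Int) (mismatches : Int) : List (String × List Int) :=
  (PySem.Set.ofList (snp_positions.map Prod.fst)).map
    (fun c => (c, pvFindClustersB ((PySem.Dict.mk snp_positions).getD c []) read_length mismatches))

-- ===== PRECONDITION & SPEC =====
def Spec_get_snp_cluster (snp_positions : List (String × List Int)) (read_length : Int) (mismatches : Int) (out : List (String × List Int)) : Prop := out = get_snp_cluster_alt snp_positions read_length mismatches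
instance (snp_positions : List (String × List Int)) (read_length : Int) (mismatches : Int) (out : List (String × List Int)) : Decidable (Spec_get_snp_cluster snp_positions read_length mismatches out) := by unfold Spec_get_snp_cluster; infer_instance

-- ===== CLAIM (what is proved, stated in full; the proofs are below) =====
def Claim_equal_get_snp_cluster : Prop := ∀ (snp_positions : List (String × List Int)) (read_length : Int) (mismatches : Int), Dom_get_snp_cluster snp_positions read_length mismatches → Spec_get_snp_cluster snp_positions read_length mismatches (get_snp_cluster snp_positions read_length mismatches)

-- ===== LEMMAS AND PROOFS =====

-- the common specification of one chromosome-and-start contribution: the first SNP past the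
-- window decides; k is its offset in the suffix `rest`
def pvContribSpec (read_length mismatches p : Int) (rest : List Int) : List Int :=
  match rest.findIdx? (fun q => q > p + read_length) with
  | none => []
  | some k => if ((k : Int) + 1 > mismatches) then p :: rest.take k else []

def pvChainSpec (read_length mismatches : Int) : List Int → List Int
  | [] => []
  | p :: rest => pvContribSpec read_length mismatches p rest ++ pvChainSpec read_length mismatches rest

-- ===== A reduces to the spec =====
theorem pvClusterLoopA_eq (read_length mismatches base : Int) :
    ∀ (rest cluster : List Int),
      pvClusterLoopA read_length mismatches base cluster rest =
        match rest.findIdx? (fun q => q > base + read_length) with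
        | none => []
        | some k => if ((cluster.length : Int) + (k : Int) > mismatches) then cluster ++ rest.take k else [] := by
  intro rest
  induction rest with
  | nil => intro cluster; simp [pvClusterLoopA]
  | cons p rest ih =>
      intro cluster
      by_cases h : p > base + read_length
      · simp [pvClusterLoopA, h, List.findIdx?_cons]
      · simp only [pvClusterLoopA, if_neg h, ih, List.findIdx?_cons,
          show (decide (p > base + read_length)) = false by simpa using h, Bool.false_eq_true,
          if_false, Option.map]
        cases hf : rest.findIdx? (fun q => q > base + read_length) with
        | none => simp
        | some k =>
            simp only [Option.map_some]
            have hlen : (((cluster ++ [p]).length : Int) + (k : Int)) = ((cluster.length : Int) + ((k + 1 : Nat) : Int)) := by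
              simp [List.length_append]; push_cast; ring
            rw [hlen]
            by_cases hc : ((cluster.length : Int) + ((k + 1 : Nat) : Int) > mismatches)
            · simp [List.take_succ_cons, List.append_assoc]
            · simp

theorem pvFindLoopA_eq (read_length mismatches : Int) (l : List Int) :
    pvFindLoopA read_length mismatches l = pvChainSpec read_length mismatches l := by
  induction l with
  | nil => rfl
  | cons p rest ih =>
      simp only [pvFindLoopA, pvChainSpec, ih, pvClusterLoopA_eq, pvContribSpec]
      cases hf : rest.findIdx? (fun q => q > p + read_length) with
      | none => rfl
      | some k =>
          simp only [List.length_cons, List.length_nil, Nat.zero_add, Nat.cast_one,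
            List.cons_append, List.nil_append]
          rw [Int.add_comm 1 (k : Int)]

-- ===== B reduces to the spec =====
-- popping entries dominated by p never changes a query with limit ≥ p
theorem pvQueryB_dropWhile (p limit : Int) (hp : p ≤ limit) :
    ∀ st : List (Int × Int),
      pvQueryB limit (st.dropWhile (fun e => e.2 ≤ p)) = pvQueryB limit st := by
  intro st
  induction st with
  | nil => rfl
  | cons e st ih =>
      by_cases h : e.2 ≤ p
      · have hq : ¬ (e.2 > limit) := by omega
        obtain ⟨idx, q⟩ := e
        simp only at h hq
        rw [List.dropWhile_cons_of_pos (by simpa using h)]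
        rw [ih]
        simp [pvQueryB, hq]
      · obtain ⟨idx, q⟩ := e
        simp only at h
        rw [List.dropWhile_cons_of_neg (by simpa using h)]

-- the pass where the stack is replaced by the full processed suffix
def pvPassSpec (snps : List Int) (read_length mismatches : Int) :
    List (Int × Int) → List (Int × Int) → List Int
  | [], _suffix => []
  | (i, p) :: rest, suffix =>
      pvPassSpec snps read_length mismatches rest ((i, p) :: suffix) ++
        (match pvQueryB (p + read_length) suffix with
         | some idx => if idx - i > mismatches then PySem.List.slice snps (some i) (some idx) else []
         | none => [])

theorem pvPassB_eq_spec (snps : List Int) (read_length mismatches : Int) :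
    ∀ (r : List (Int × Int)) (st suffix : List (Int × Int)) (exclude : List Int),
      (∀ limit, pvQueryB limit st = pvQueryB limit suffix) →
      pvPassB snps read_length mismatches r st exclude =
        pvPassSpec snps read_length mismatches r suffix ++ exclude := by
  intro r
  induction r with
  | nil => intro st suffix exclude _; simp [pvPassB, pvPassSpec]
  | cons e rest ih =>
      intro st suffix exclude hinv
      obtain ⟨i, p⟩ := e
      have hinv' : ∀ limit, pvQueryB limit ((i, p) :: st.dropWhile (fun e => e.2 ≤ p)) =
          pvQueryB limit ((i, p) :: suffix) := by
        intro limit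
        by_cases h : p > limit
        · simp [pvQueryB, h]
        · simp only [pvQueryB, if_neg h]
          rw [pvQueryB_dropWhile p limit (by omega), hinv]
      simp only [pvPassB, pvPassSpec]
      rw [ih _ _ _ hinv', hinv]
      cases pvQueryB (p + read_length) suffix with
      | none => simp
      | some idx =>
          by_cases hc : idx - i > mismatches
          · simp [hc, List.append_assoc]
          · simp [hc]

theorem pvPassSpec_append (snps : List Int) (read_length mismatches : Int) :
    ∀ (xs ys suffix : List (Int × Int)),
      pvPassSpec snps read_length mismatches (xs ++ ys) suffix =
        pvPassSpec snps read_length mismatches ys (xs.reverse ++ suffix) ++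
          pvPassSpec snps read_length mismatches xs suffix := by
  intro xs
  induction xs with
  | nil => intro ys suffix; simp [pvPassSpec]
  | cons e xs ih =>
      intro ys suffix
      obtain ⟨i, p⟩ := e
      simp only [List.cons_append, pvPassSpec, ih, List.reverse_cons, List.append_assoc,
        List.singleton_append, List.nil_append]

-- a query over the enumerated suffix is findIdx? shifted by the start index
theorem pvQueryB_enumerate (limit : Int) :
    ∀ (l : List Int) (m : Int),
      pvQueryB limit (PySem.List.enumerate l m) =
        (l.findIdx? (fun q => q > limit)).map (fun k : Nat => m + (k : Int)) := by
  intro l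
  induction l with
  | nil => intro m; simp [PySem.List.enumerate_nil, pvQueryB]
  | cons q l ih =>
      intro m
      rw [PySem.List.enumerate_cons]
      by_cases h : q > limit
      · simp [pvQueryB, h, List.findIdx?_cons]
      · simp only [pvQueryB, if_neg h, ih, List.findIdx?_cons,
          show (decide (q > limit)) = false by simpa using h, Bool.false_eq_true, if_false,
          Option.map]
        cases l.findIdx? (fun x => x > limit) with
        | none => rfl
        | some k =>
            simp only [Option.map_some, Option.some.injEq]
            push_cast
            ring

theorem pvPassSpec_reverse_enumerate (read_length mismatches : Int) (snps : List Int) :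
    ∀ (l : List Int) (m : Nat), snps.drop m = l →
      pvPassSpec snps read_length mismatches ((PySem.List.enumerate l (m : Int)).reverse) [] =
        pvChainSpec read_length mismatches l := by
  intro l
  induction l with
  | nil => intro m _; simp [PySem.List.enumerate_nil, pvPassSpec, pvChainSpec]
  | cons p rest ih =>
      intro m hdrop
      have hdrop' : snps.drop (m + 1) = rest := by
        rw [← List.drop_drop, hdrop]
        rfl
      rw [PySem.List.enumerate_cons, List.reverse_cons,
        pvPassSpec_append, List.reverse_reverse]
      have hcast : ((m : Int) + 1) = ((m + 1 : Nat) : Int) := by push_cast; ring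
      rw [hcast, ih (m + 1) hdrop']
      simp only [pvPassSpec, List.append_nil, pvChainSpec]
      congr 1
      rw [pvQueryB_enumerate, pvContribSpec]
      cases hf : rest.findIdx? (fun q => q > p + read_length) with
      | none => rfl
      | some k =>
          simp only [Option.map_some, List.nil_append]
          have hk : k < rest.length := (List.findIdx?_eq_some_iff_findIdx_eq.mp hf).1
          have hidx : ((m + 1 : Nat) : Int) + (k : Int) = (m : Int) + ((k + 1 : Nat) : Int) := by
            push_cast; ring
          rw [hidx, PySem.List.slice_natCast_add]
          have hslice : (snps.drop m).take (k + 1) = p :: rest.take k := by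
            rw [hdrop]; rfl
          rw [hslice]
          have hcond : ((m : Int) + ((k + 1 : Nat) : Int) - (m : Int) > mismatches) ↔ ((k : Int) + 1 > mismatches) := by
            constructor <;> intro h <;> push_cast at * <;> omega
          by_cases hc : ((k : Int) + 1 > mismatches)
          · rw [if_pos (hcond.mpr hc), if_pos hc]
          · rw [if_neg (fun h => hc (hcond.mp h)), if_neg hc]

-- per-chromosome equality
theorem pvFind_eq (snps : List Int) (read_length mismatches : Int) :
    find_snp_cluster snps read_length mismatches = pvFindClustersB snps read_length mismatches := by
  unfold find_snp_cluster pvFindClustersB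
  congr 1
  rw [pvFindLoopA_eq,
    pvPassB_eq_spec snps read_length mismatches _ [] [] [] (fun _ => rfl),
    List.append_nil]
  exact (pvPassSpec_reverse_enumerate read_length mismatches snps snps 0 rfl).symm

-- ===== VERDICT (by name: the statement is the Claim_ definition above) =====
theorem get_snp_cluster_spec : Claim_equal_get_snp_cluster := by
  intro snp_positions read_length mismatches _
  unfold Spec_get_snp_cluster get_snp_cluster get_snp_cluster_alt
  have h := PySem.Dict.items_foldl_insert_fresh
        (l := PySem.Set.ofList (snp_positions.map Prod.fst))
        (d := PySem.Dict.empty)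
        (k := fun c => c)
        (v := fun c => find_snp_cluster ((PySem.Dict.mk snp_positions).getD c []) read_length mismatches)
        (fun a _ => PySem.Dict.contains_empty a)
        (by simpa [List.map_id] using PySem.Set.nodup_ofList (snp_positions.map Prod.fst))
  rw [h]
  simp only [pvFind_eq]
  rfl
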